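-- pv_equiv track=rewrite | github.com/LenisLin/macro-veritas | scripts/dev/update_changelog.py | insert_unreleased_entry
-- ===== SOURCE A (Python) =====
-- CHANGELOG_HEADER = "# Changelog"
--
-- UNRELEASED_HEADER = "## Unreleased"
--
-- def _normalize_entry(entry: str) -> str:
--     stripped = entry.strip()
--     if not stripped.startswith("- "):
--         return "- " + stripped
--     return stripped
--
-- def _render_lines(lines: list[str]) -> str:
--     return "\n".join(lines).rstrip("\n") + "\n"
--
-- def _find_line(lines: list[str], expected: str) -> int | None:
--     for index, line in enumerate(lines):
--         if line.strip() == expected: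
--             return index
--     return None
--
-- def _ensure_changelog_header(lines: list[str]) -> list[str]:
--     if _find_line(lines, CHANGELOG_HEADER) is not None:
--         return lines
--
--     if lines:
--         return [CHANGELOG_HEADER, "", *lines]
--     return [CHANGELOG_HEADER, ""]
--
-- def insert_unreleased_entry(md_text: str, entry: str) -> str:
--     entry_line = _normalize_entry(entry)
--     lines = md_text.splitlines()
--
--     if any(line.strip() == entry_line for line in lines):
--         return _render_lines(lines)
--
--     lines = _ensure_changelog_header(lines)
--
--     unreleased_index = _find_line(lines, UNRELEASED_HEADER)
--     if unreleased_index is None: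
--         changelog_index = _find_line(lines, CHANGELOG_HEADER)
--         if changelog_index is None:
--             raise ValueError("Missing changelog header after normalization.")
--         insert_at = changelog_index + 1
--         lines[insert_at:insert_at] = ["", UNRELEASED_HEADER]
--         unreleased_index = _find_line(lines, UNRELEASED_HEADER)
--         if unreleased_index is None:
--             raise ValueError("Failed to create Unreleased section.")
--
--     end_index = len(lines)
--     for index in range(unreleased_index + 1, len(lines)):
--         if lines[index].startswith("## "):
--             end_index = index
--             break
--
--     insert_at = end_index
--     while insert_at > unreleased_index + 1 and lines[insert_at - 1].strip() == "":
--         insert_at -= 1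
--
--     lines.insert(insert_at, entry_line)
--     return _render_lines(lines)
-- ===== SOURCE B (Python) =====
-- CHANGELOG_HEADER = "# Changelog"
-- UNRELEASED_HEADER = "## Unreleased"
--
--
-- def _render(lines):
--     return "\n".join(lines).rstrip("\n") + "\n"
--
--
-- def _split_after(lines, header):
--     """Split lines into (prefix-including-first-header-line, rest), or (lines, None)."""
--     for i, line in enumerate(lines):
--         if line.strip() == header:
--             return lines[: i + 1], lines[i + 1 :]
--     return lines, None
--
--
-- def _append_entry(rest, entry_line):
--     """One forward pass over the Unreleased body: keep lines, buffer blank runs,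
--     and place the entry before the trailing blank run / the next '## ' header."""
--     kept = []
--     blanks = []
--     for i, line in enumerate(rest):
--         if line.startswith("## "):
--             return kept + [entry_line] + blanks + rest[i:]
--         if line.strip() == "":
--             blanks.append(line)
--         else:
--             kept = kept + blanks + [line]
--             blanks = []
--     return kept + [entry_line] + blanks
--
--
-- def insert_unreleased_entry(md_text: str, entry: str) -> str:
--     stripped = entry.strip()
--     entry_line = stripped if stripped.startswith("- ") else "- " + stripped
--     lines = md_text.splitlines()
--
--     if any(line.strip() == entry_line for line in lines):
--         return _render(lines)
--
--     if not any(line.strip() == CHANGELOG_HEADER for line in lines):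
--         lines = [CHANGELOG_HEADER, ""] + lines
--
--     pre, rest = _split_after(lines, UNRELEASED_HEADER)
--     if rest is None:
--         head, tail = _split_after(lines, CHANGELOG_HEADER)
--         pre = head + ["", UNRELEASED_HEADER]
--         rest = tail
--
--     return _render(pre + _append_entry(rest, entry_line))
-- ===== Notes on version B (the rewrite author's own statement) =====
-- stated objective: alternative
-- what changed: B splits the line list structurally (prefix up to a header / rest) and places the entry with one forward pass over the Unreleased body that buffers blank runs, replacing A's index searches, slice splicing and backward while-loop over indices.
import Mathlib
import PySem

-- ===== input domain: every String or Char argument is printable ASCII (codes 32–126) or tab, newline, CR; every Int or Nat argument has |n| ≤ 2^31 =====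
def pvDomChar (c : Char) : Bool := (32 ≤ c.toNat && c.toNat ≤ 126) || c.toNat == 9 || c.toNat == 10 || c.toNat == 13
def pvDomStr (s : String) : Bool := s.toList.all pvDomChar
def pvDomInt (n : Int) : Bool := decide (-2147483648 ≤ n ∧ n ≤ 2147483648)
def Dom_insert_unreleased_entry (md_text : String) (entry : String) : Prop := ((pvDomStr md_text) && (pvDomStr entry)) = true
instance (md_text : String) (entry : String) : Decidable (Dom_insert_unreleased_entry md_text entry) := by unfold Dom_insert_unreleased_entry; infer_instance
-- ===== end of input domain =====

-- B replaces A's index searches, slice splicing and backward while-loop by a structural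
-- split of the line list and one forward pass over the Unreleased body (objective: alternative).

-- ===== PORT A =====

-- _render(lines): "\n".join(lines).rstrip("\n") + "\n".
-- .rstrip("\n") is ported by hand (PySem has no chars-argument rstrip): dropping the
-- trailing run of '\n' characters is exactly Python's str.rstrip("\n").
def pvRender (lines : List String) : String :=
  String.ofList (((PySem.Str.join "\n" lines).toList.reverse.dropWhile (· == '\n')).reverse ++ ['\n'])

-- _find_line: first index whose strip() equals expected, else None
def pvFindLine : List String → String → Option Nat
  | [], _ => none
  | line :: rest, expected =>
      if PySem.Str.strip line == expected then some 0
      else (pvFindLine rest expected).map (· + 1)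

-- _ensure_changelog_header
def pvEnsureChangelogHeader (lines : List String) : List String :=
  if (pvFindLine lines "# Changelog").isSome then lines
  else if !lines.isEmpty then ["# Changelog", ""] ++ lines
  else ["# Changelog", ""]

-- for index in range(u+1, len(lines)): if lines[index].startswith("## "): break
def pvFindEnd (lines : List String) (i : Nat) : Nat :=
  if h : i < lines.length then
    if PySem.Str.startswith lines[i] "## " then i else pvFindEnd lines (i + 1)
  else lines.length
termination_by lines.length - i

-- while insert_at > floor and lines[insert_at-1].strip() == "": insert_at -= 1
-- lines[insert_at-1] is ported as getD with default "": the index is always in range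
-- when the condition is reached (floor < i ≤ len(lines)), so the default is never read.
def pvBackup (lines : List String) (floor : Nat) (i : Nat) : Nat :=
  if h : floor < i ∧ PySem.Str.strip (lines.getD (i - 1) "") == "" then
    pvBackup lines floor (i - 1)
  else i
termination_by i
decreasing_by omega

def insert_unreleased_entry (md_text : String) (entry : String) : String :=
  let stripped := PySem.Str.strip entry
  let entry_line := if !(PySem.Str.startswith stripped "- ") then "- " ++ stripped else stripped
  let lines := PySem.Str.splitlines md_text
  if lines.any (fun line => PySem.Str.strip line == entry_line) then
    pvRender lines
  else
    let lines := pvEnsureChangelogHeader lines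
    -- unreleased_index (creating the section when missing);
    -- lines[insert_at:insert_at] = ["", "## Unreleased"] with insert_at = ci+1 ≤ len(lines)
    -- is exactly take (ci+1) ++ new ++ drop (ci+1)
    let state : List String × Nat :=
      match pvFindLine lines "## Unreleased" with
      | some u => (lines, u)
      | none =>
          match pvFindLine lines "# Changelog" with
          | none => (lines, 0)  -- Python: raise ValueError; unreachable, the header was just ensured
          | some ci =>
              let lines2 := lines.take (ci + 1) ++ ["", "## Unreleased"] ++ lines.drop (ci + 1)
              match pvFindLine lines2 "## Unreleased" with
              | some u => (lines2, u)
              | none => (lines2, 0)  -- Python: raise ValueError; unreachable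
    let endIndex := pvFindEnd state.1 (state.2 + 1)
    let insertAt := pvBackup state.1 (state.2 + 1) endIndex
    pvRender (state.1.insertIdx insertAt entry_line)

-- ===== PORT B =====

-- _split_after: (lines[:i+1], lines[i+1:]) at the first line stripping to header, else (lines, None)
def altSplitAfter : List String → String → List String × Option (List String)
  | [], _ => ([], none)
  | line :: rest, header =>
      if PySem.Str.strip line == header then ([line], some rest)
      else
        let p := altSplitAfter rest header
        (line :: p.1, p.2)

-- _append_entry: one forward pass with the loop state (kept, blanks) as accumulators
def altAppendEntry : List String → List String → List String → String → List String
  | [], kept, blanks, e => kept ++ [e] ++ blanks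
  | line :: rest, kept, blanks, e =>
      if PySem.Str.startswith line "## " then kept ++ [e] ++ blanks ++ (line :: rest)
      else if PySem.Str.strip line == "" then altAppendEntry rest kept (blanks ++ [line]) e
      else altAppendEntry rest (kept ++ blanks ++ [line]) [] e

def insert_unreleased_entry_alt (md_text : String) (entry : String) : String :=
  let stripped := PySem.Str.strip entry
  let entry_line := if PySem.Str.startswith stripped "- " then stripped else "- " ++ stripped
  let lines := PySem.Str.splitlines md_text
  if lines.any (fun line => PySem.Str.strip line == entry_line) then
    pvRender lines
  else
    let lines :=
      if lines.any (fun line => PySem.Str.strip line == "# Changelog") then lines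
      else ["# Changelog", ""] ++ lines
    match altSplitAfter lines "## Unreleased" with
    | (pre, some rest) => pvRender (pre ++ altAppendEntry rest [] [] entry_line)
    | (lines', none) =>
        match altSplitAfter lines' "# Changelog" with
        | (head, some tail) =>
            pvRender ((head ++ ["", "## Unreleased"]) ++ altAppendEntry tail [] [] entry_line)
        | (head, none) => pvRender head  -- unreachable: the changelog header is present here

-- ===== PRECONDITION & SPEC =====
def Spec_insert_unreleased_entry (md_text : String) (entry : String) (out : String) : Prop := out = insert_unreleased_entry_alt md_text entry
instance (md_text : String) (entry : String) (out : String) : Decidable (Spec_insert_unreleased_entry md_text entry out) := by unfold Spec_insert_unreleased_entry; infer_instance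

-- ===== CLAIM (what is proved, stated in full; the proofs are below) =====
def Claim_equal_insert_unreleased_entry : Prop := ∀ (md_text : String) (entry : String), Dom_insert_unreleased_entry md_text entry → Spec_insert_unreleased_entry md_text entry (insert_unreleased_entry md_text entry)

-- ===== LEMMAS AND PROOFS =====

def pvBl (l : String) : Bool := PySem.Str.strip l == ""
def pvBp (l : String) : Bool := PySem.Str.startswith l "## "
def pvRtrim (xs : List String) : List String := (xs.reverse.dropWhile pvBl).reverse
def pvRblanks (xs : List String) : List String := (xs.reverse.takeWhile pvBl).reverse

theorem findLine_isSome_eq_any (xs : List String) (e : String) :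
    (pvFindLine xs e).isSome = xs.any (fun l => PySem.Str.strip l == e) := by
  induction xs with
  | nil => rfl
  | cons l r ih =>
      simp only [pvFindLine, List.any_cons]
      cases h : (PySem.Str.strip l == e) <;> simp [h, ih]

theorem split_of_find_none (xs : List String) (e : String) (h : pvFindLine xs e = none) :
    altSplitAfter xs e = (xs, none) := by
  induction xs with
  | nil => rfl
  | cons l r ih =>
      simp only [pvFindLine] at h
      by_cases hl : (PySem.Str.strip l == e) = true
      · simp [hl] at h
      · simp [hl] at h ⊢
        simp [altSplitAfter, hl, ih h]

theorem split_of_find_some (xs : List String) (e : String) (u : Nat)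
    (h : pvFindLine xs e = some u) :
    altSplitAfter xs e = (xs.take (u + 1), some (xs.drop (u + 1))) := by
  induction xs generalizing u with
  | nil => simp [pvFindLine] at h
  | cons l r ih =>
      simp only [pvFindLine] at h
      by_cases hl : (PySem.Str.strip l == e) = true
      · simp [hl] at h
        simp [altSplitAfter, hl, ← h]
      · simp [hl] at h
        obtain ⟨v, hv, rfl⟩ := h
        simp [altSplitAfter, hl, ih v hv]

theorem find_lt_length (xs : List String) (e : String) (u : Nat)
    (h : pvFindLine xs e = some u) : u < xs.length := by
  induction xs generalizing u with
  | nil => simp [pvFindLine] at h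
  | cons l r ih =>
      simp only [pvFindLine] at h
      by_cases hl : (PySem.Str.strip l == e) = true
      · simp [hl] at h; simp; omega
      · simp [hl] at h
        obtain ⟨v, hv, rfl⟩ := h
        have := ih v hv
        simp; omega

theorem find_none_iff (xs : List String) (e : String) :
    pvFindLine xs e = none ↔ ∀ l ∈ xs, (PySem.Str.strip l == e) = false := by
  induction xs with
  | nil => simp [pvFindLine]
  | cons l r ih =>
      by_cases hl : (PySem.Str.strip l == e) = true
      · simp only [pvFindLine, hl, if_true]
        constructor
        · intro hc; exact absurd hc (by simp)
        · intro hall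
          have := hall l (by simp)
          rw [hl] at this; cases this
      · simp only [pvFindLine]
        rw [if_neg hl]
        have hm : (Option.map (· + 1) (pvFindLine r e) = none) ↔ pvFindLine r e = none := by
          cases pvFindLine r e <;> simp
        rw [hm, ih]
        constructor
        · rintro h x hx
          rcases List.mem_cons.mp hx with rfl | hx'
          · exact Bool.eq_false_iff.mpr hl
          · exact h x hx'
        · intro h x hx; exact h x (List.mem_cons_of_mem l hx)

theorem find_append (xs ys : List String) (e : String) :
    pvFindLine (xs ++ ys) e =
      (match pvFindLine xs e with
       | some k => some k
       | none => (pvFindLine ys e).map (· + xs.length)) := by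
  induction xs with
  | nil => simp [pvFindLine]
  | cons l r ih =>
      by_cases hl : (PySem.Str.strip l == e) = true
      · simp [pvFindLine, hl]
      · simp only [List.cons_append, pvFindLine, hl, if_false, ih]
        cases h : pvFindLine r e with
        | some k => simp
        | none =>
            cases pvFindLine ys e <;> simp [Nat.add_comm, Nat.add_assoc, Nat.add_left_comm]

theorem findEnd_spec (rest : List String) : ∀ (pre : List String),
    pvFindEnd (pre ++ rest) pre.length =
      pre.length + (rest.takeWhile (fun l => !pvBp l)).length := by
  induction rest with
  | nil => intro pre; rw [pvFindEnd]; simp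
  | cons l r ih =>
      intro pre
      rw [pvFindEnd]
      have hlen : pre.length < (pre ++ l :: r).length := by simp
      have hget : (pre ++ l :: r)[pre.length]'hlen = l := by
        rw [List.getElem_append_right (Nat.le_refl _)]
        simp
      rw [dif_pos hlen]
      by_cases hb : pvBp l = true
      · simp only [hget]
        rw [if_pos (by simpa [pvBp] using hb)]
        simp [List.takeWhile_cons, hb]
      · simp only [hget]
        rw [if_neg (by simpa [pvBp] using hb)]
        have := ih (pre ++ [l])
        simp only [List.append_assoc, List.singleton_append, List.length_append,
          List.length_cons, List.length_nil] at this
        rw [show pre.length + 1 = pre.length + 1 from rfl]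
        calc pvFindEnd (pre ++ l :: r) (pre.length + 1)
            = pre.length + 1 + (r.takeWhile (fun l => !pvBp l)).length := by
              simpa using this
          _ = pre.length + ((l :: r).takeWhile (fun l => !pvBp l)).length := by
              simp [List.takeWhile_cons, hb]; omega

theorem backup_blanks (q : List String) : ∀ (pre tail : List String) (floor : Nat),
    floor ≤ pre.length → (∀ l ∈ q, pvBl l = true) →
    pvBackup (pre ++ (q ++ tail)) floor (pre.length + q.length) =
      pvBackup (pre ++ (q ++ tail)) floor pre.length := by
  induction q using List.reverseRecOn with
  | nil => intro pre tail floor _ _; simp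
  | append_singleton q' b ih =>
      intro pre tail floor hfl hbl
      have hb : pvBl b = true := hbl b (by simp)
      have hgd : (pre ++ ((q' ++ [b]) ++ tail)).getD (pre.length + q'.length) "" = b := by
        have : pre ++ ((q' ++ [b]) ++ tail) = (pre ++ q') ++ (b :: tail) := by simp
        rw [this, List.getD, List.getElem?_append_right (by simp)]
        simp
      rw [pvBackup]
      rw [dif_pos ⟨by simp; omega, by
        have : pre.length + (q' ++ [b]).length - 1 = pre.length + q'.length := by
          simp
        rw [this, hgd]; simpa [pvBl] using hb⟩]
      have h1 : pre.length + (q' ++ [b]).length - 1 = pre.length + q'.length := by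
        simp
      rw [h1]
      have := ih pre (b :: tail) floor hfl (fun l hl => hbl l (by simp [hl]))
      simpa using this

theorem backup_stop (lines : List String) (floor m : Nat)
    (h : floor = m ∨ (PySem.Str.strip (lines.getD (m - 1) "") == "") = false) :
    pvBackup lines floor m = m := by
  rw [pvBackup]
  rcases h with h | h
  · rw [dif_neg]; rintro ⟨h1, _⟩; omega
  · rw [dif_neg]; rintro ⟨_, h2⟩; rw [h] at h2; exact absurd h2 (by simp)

theorem rtrim_append_rblanks (xs : List String) : pvRtrim xs ++ pvRblanks xs = xs := by
  simp only [pvRtrim, pvRblanks, ← List.reverse_append, List.takeWhile_append_dropWhile,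
    List.reverse_reverse]

theorem rblanks_blank (xs : List String) : ∀ l ∈ pvRblanks xs, pvBl l = true := by
  intro l hl
  simp only [pvRblanks, List.mem_reverse] at hl
  exact List.mem_takeWhile_imp hl

theorem rtrim_all_blank (xs : List String) (h : ∀ l ∈ xs, pvBl l = true) : pvRtrim xs = [] := by
  simp [pvRtrim, List.dropWhile_eq_nil_iff]
  intro a ha; exact h a (by simpa using ha)

theorem rblanks_all_blank (xs : List String) (h : ∀ l ∈ xs, pvBl l = true) : pvRblanks xs = xs := by
  simp only [pvRblanks]
  rw [List.takeWhile_eq_self_iff.mpr (fun a ha => h a (by simpa using ha))]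
  simp

theorem rtrim_append_nonblank (xs ys : List String) (l : String) (hl : pvBl l = false) :
    pvRtrim (xs ++ l :: ys) = xs ++ l :: pvRtrim ys := by
  simp only [pvRtrim, List.reverse_append, List.reverse_cons]
  rw [List.append_assoc, List.singleton_append, List.dropWhile_append]
  by_cases he : (ys.reverse.dropWhile pvBl).isEmpty
  · simp only [he, if_true]
    rw [List.dropWhile_cons_of_neg (by simp [hl])]
    rw [List.isEmpty_iff] at he
    simp [he]
  · simp only [he, if_false]
    simp

theorem rblanks_append_nonblank (xs ys : List String) (l : String) (hl : pvBl l = false) :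
    pvRblanks (xs ++ l :: ys) = pvRblanks ys := by
  simp only [pvRblanks, List.reverse_append, List.reverse_cons]
  rw [List.append_assoc, List.singleton_append, List.takeWhile_append]
  by_cases ha : (ys.reverse.takeWhile pvBl).length = ys.reverse.length
  · rw [if_pos ha]
    rw [List.takeWhile_cons_of_neg (by simp [hl])]
    rw [(List.takeWhile_prefix (p := pvBl) (l := ys.reverse)).eq_of_length ha]
    simp
  · rw [if_neg ha]

theorem appendEntry_spec (rest : List String) : ∀ (kept blanks : List String) (e : String),
    (∀ l ∈ blanks, pvBl l = true) →
    altAppendEntry rest kept blanks e =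
      kept ++ pvRtrim (blanks ++ rest.takeWhile (fun l => !pvBp l)) ++
        e :: (pvRblanks (blanks ++ rest.takeWhile (fun l => !pvBp l)) ++
          rest.dropWhile (fun l => !pvBp l)) := by
  induction rest with
  | nil =>
      intro kept blanks e hb
      simp [altAppendEntry, rtrim_all_blank blanks hb, rblanks_all_blank blanks hb]
  | cons l r ih =>
      intro kept blanks e hb
      by_cases hp : PySem.Str.startswith l "## " = true
      · have hp' : pvBp l = true := by simpa [pvBp] using hp
        simp only [altAppendEntry, hp, if_true]
        rw [List.takeWhile_cons_of_neg (by simp [hp']), List.dropWhile_cons_of_neg (by simp [hp'])]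
        simp [rtrim_all_blank blanks hb, rblanks_all_blank blanks hb]
      · have hp' : pvBp l = false := by simpa [pvBp] using hp
        by_cases hs : (PySem.Str.strip l == "") = true
        · have hs' : pvBl l = true := by simpa [pvBl] using hs
          simp only [altAppendEntry, hp, if_false, hs, if_true]
          rw [ih kept (blanks ++ [l]) e (by
            intro x hx
            rcases List.mem_append.mp hx with h | h
            · exact hb x h
            · simp at h; subst h; exact hs')]
          rw [List.takeWhile_cons_of_pos (by simp [hp']), List.dropWhile_cons_of_pos (by simp [hp'])]
          simp
        · have hs' : pvBl l = false := by simpa [pvBl] using hs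
          simp only [altAppendEntry, hp, if_false, hs]
          rw [ih (kept ++ blanks ++ [l]) [] e (by intro x hx; simp at hx)]
          rw [List.takeWhile_cons_of_pos (by simp [hp']), List.dropWhile_cons_of_pos (by simp [hp'])]
          rw [show blanks ++ l :: r.takeWhile (fun l => !pvBp l)
                = blanks ++ l :: (r.takeWhile (fun l => !pvBp l)) from rfl]
          rw [rtrim_append_nonblank blanks _ l hs', rblanks_append_nonblank blanks _ l hs']
          simp

theorem insertIdx_at_length (xs ys : List String) (e : String) :
    (xs ++ ys).insertIdx xs.length e = xs ++ e :: ys := by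
  induction xs with
  | nil => simp
  | cons a t ih => simp [List.insertIdx_succ_cons, ih]

theorem dropWhile_head_false {p : String → Bool} {l : List String} {x : String} {xs : List String}
    (h : l.dropWhile p = x :: xs) : p x = false := by
  have h' : l.dropWhile p ≠ [] := by simp [h]
  have := List.head_dropWhile_not p (l := l) h'
  simp only [h, List.head_cons] at this
  exact this

theorem core (pre rest : List String) (e : String) :
    (pre ++ rest).insertIdx
        (pvBackup (pre ++ rest) pre.length (pvFindEnd (pre ++ rest) pre.length)) e =
      pre ++ altAppendEntry rest [] [] e := by
  set body := rest.takeWhile (fun l => !pvBp l) with hbody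
  set tail := rest.dropWhile (fun l => !pvBp l) with htail
  have hrest : rest = body ++ tail := (List.takeWhile_append_dropWhile).symm
  have hfe : pvFindEnd (pre ++ rest) pre.length = pre.length + body.length :=
    findEnd_spec rest pre
  set c := pvRtrim body with hc
  set q := pvRblanks body with hq
  have hcq : c ++ q = body := rtrim_append_rblanks body
  have hqb : ∀ l ∈ q, pvBl l = true := rblanks_blank body
  have hL : pre ++ rest = (pre ++ c) ++ (q ++ tail) := by
    rw [hrest, ← hcq]; simp
  have hlen : pre.length + body.length = (pre ++ c).length + q.length := by
    simp [← hcq]; omega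
  have hbk : pvBackup (pre ++ rest) pre.length (pvFindEnd (pre ++ rest) pre.length)
      = (pre ++ c).length := by
    rw [hfe, hlen, hL]
    rw [backup_blanks q (pre ++ c) tail pre.length (by simp) hqb]
    -- stop at (pre ++ c).length
    rcases hd : body.reverse.dropWhile pvBl with _ | ⟨x, d'⟩
    · have hc0 : c = [] := by simp [hc, pvRtrim, hd]
      exact backup_stop _ _ _ (Or.inl (by simp [hc0]))
    · have hx : pvBl x = false := dropWhile_head_false hd
      have hcx : c = d'.reverse ++ [x] := by simp [hc, pvRtrim, hd]
      refine backup_stop _ _ _ (Or.inr ?_)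
      have hidx : (pre ++ c).length - 1 = (pre ++ d'.reverse).length := by
        simp [hcx]
      rw [hidx]
      have hsplit : (pre ++ c) ++ (q ++ tail) = (pre ++ d'.reverse) ++ (x :: (q ++ tail)) := by
        simp [hcx]
      rw [hsplit, List.getD, List.getElem?_append_right (Nat.le_refl _)]
      simpa [pvBl] using hx
  rw [hbk, hL, insertIdx_at_length]
  rw [appendEntry_spec rest [] [] e (by intro x hx; simp at hx)]
  simp only [List.nil_append, ← hbody, ← htail]
  rw [← hc, ← hq]
  simp

theorem ensure_has_changelog (lines : List String) :
    (pvFindLine (pvEnsureChangelogHeader lines) "# Changelog").isSome := by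
  unfold pvEnsureChangelogHeader
  by_cases h : (pvFindLine lines "# Changelog").isSome
  · simpa [h]
  · have hlit : (PySem.Str.strip "# Changelog" == "# Changelog") = true := by decide
    by_cases he : lines.isEmpty <;> simp [h, he, pvFindLine, hlit]

theorem main_eq (md_text entry : String) :
    insert_unreleased_entry md_text entry = insert_unreleased_entry_alt md_text entry := by
  unfold insert_unreleased_entry insert_unreleased_entry_alt
  simp only []
  -- the two normalizations agree
  have hnorm : (if !(PySem.Str.startswith (PySem.Str.strip entry) "- ") then
        "- " ++ PySem.Str.strip entry else PySem.Str.strip entry)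
      = (if PySem.Str.startswith (PySem.Str.strip entry) "- " then
        PySem.Str.strip entry else "- " ++ PySem.Str.strip entry) := by
    cases PySem.Str.startswith (PySem.Str.strip entry) "- " <;> simp
  rw [hnorm]
  set e := (if PySem.Str.startswith (PySem.Str.strip entry) "- " then
      PySem.Str.strip entry else "- " ++ PySem.Str.strip entry) with he
  set lines0 := PySem.Str.splitlines md_text with hl0
  by_cases hdup : lines0.any (fun line => PySem.Str.strip line == e) = true
  · simp [hdup]
  · simp only [hdup, if_false, Bool.false_eq_true]
    -- the ensure-header step agrees
    have hens : pvEnsureChangelogHeader lines0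
        = (if lines0.any (fun line => PySem.Str.strip line == "# Changelog") then lines0
           else ["# Changelog", ""] ++ lines0) := by
      unfold pvEnsureChangelogHeader
      rw [← findLine_isSome_eq_any]
      by_cases h : (pvFindLine lines0 "# Changelog").isSome
      · simp [h]
      · by_cases hemp : lines0.isEmpty
        · rw [List.isEmpty_iff] at hemp
          simp [h, hemp]
        · simp [h, hemp]
    rw [← hens]
    set lines1 := pvEnsureChangelogHeader lines0 with hl1
    cases hu : pvFindLine lines1 "## Unreleased" with
    | some u =>
        have hus := split_of_find_some lines1 "## Unreleased" u hu
        have hul := find_lt_length lines1 "## Unreleased" u hu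
        simp only [hu, hus]
        have hsplit : lines1 = lines1.take (u + 1) ++ lines1.drop (u + 1) := by simp
        have hplen : (lines1.take (u + 1)).length = u + 1 := by
          simp; omega
        have := core (lines1.take (u + 1)) (lines1.drop (u + 1)) e
        rw [hplen] at this
        rw [← hsplit] at this
        rw [this]
    | none =>
        have hci : (pvFindLine lines1 "# Changelog").isSome := ensure_has_changelog lines0
        cases hc : pvFindLine lines1 "# Changelog" with
        | none => rw [hc] at hci; simp at hci
        | some ci =>
            have hcl := find_lt_length lines1 "# Changelog" ci hc
            have hnone1 : pvFindLine (lines1.take (ci + 1)) "## Unreleased" = none := by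
              rw [find_none_iff]
              intro l hl
              exact (find_none_iff lines1 "## Unreleased").mp hu l (List.mem_of_mem_take hl)
            have htlen : (lines1.take (ci + 1)).length = ci + 1 := by simp; omega
            have hfind2 : pvFindLine
                (lines1.take (ci + 1) ++ ["", "## Unreleased"] ++ lines1.drop (ci + 1))
                "## Unreleased" = some (ci + 2) := by
              rw [List.append_assoc, find_append, hnone1]
              have h1 : pvFindLine (["", "## Unreleased"] ++ lines1.drop (ci + 1)) "## Unreleased"
                  = some 1 := by
                simp only [List.cons_append, List.nil_append, pvFindLine]
                rw [if_neg (by decide), if_pos (by decide)]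
                rfl
              rw [h1]
              simp [htlen]
              omega
            have hbn := split_of_find_none lines1 "## Unreleased" hu
            have hbs := split_of_find_some lines1 "# Changelog" ci hc
            simp only [hu, hc, hfind2, hbn, hbs]
            have hsplit : lines1.take (ci + 1) ++ ["", "## Unreleased"] ++ lines1.drop (ci + 1)
                = (lines1.take (ci + 1) ++ ["", "## Unreleased"]) ++ lines1.drop (ci + 1) := by
              simp
            have hplen : (lines1.take (ci + 1) ++ ["", "## Unreleased"]).length = ci + 2 + 1 := by
              simp; omega
            rw [hsplit]
            have hcore := core (lines1.take (ci + 1) ++ ["", "## Unreleased"])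
              (lines1.drop (ci + 1)) e
            rw [hplen] at hcore
            rw [hcore]

-- ===== VERDICT (by name: the statement is the Claim_ definition above) =====
theorem insert_unreleased_entry_spec : Claim_equal_insert_unreleased_entry := by
  intro md_text entry _
  unfold Spec_insert_unreleased_entry
  exact main_eq md_text entry
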